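-- pv_equiv track=rewrite | github.com/duridudu/Algorithms | 프로그래머스/2/42626. 더 맵게/더 맵게.py | solution
-- ===== SOURCE A (Python) =====
-- from heapq import heappop, heappush
--
-- def solution(scoville, K):
--     answer = 0
--     heap = []
--     for s in scoville:
--         heappush(heap,s)
--     while(True):
--         if len(heap)==1 and heap[0]<K:
--             answer=-1
--             break
--         elif heap[0]>=K:
--             break
--         else:
--             h1 = heappop(heap)
--             h2 = heappop(heap)
--             heappush(heap, h1+h2*2)
--
--             answer+=1
--     return answer
-- ===== SOURCE B (Python) =====
-- def solution(scoville, K):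
--     pot = sorted(scoville, reverse=True)
--     answer = 0
--     while True:
--         if pot[-1] >= K:
--             return answer
--         if len(pot) == 1:
--             return -1
--         a = pot.pop()
--         b = pot.pop()
--         v = a + 2 * b
--         lo, hi = 0, len(pot)
--         while lo < hi:
--             mid = (lo + hi) // 2
--             if pot[mid] > v:
--                 lo = mid + 1
--             else:
--                 hi = mid
--         pot.insert(lo, v)
--         answer += 1
-- ===== Notes on version B (the rewrite author's own statement) =====
-- stated objective: alternative
-- what changed: Replaces the binary min-heap (heapq push/pop) with a descending-sorted plain list: the two smallest scovilles are popped from the end in O(1) and the mixed value is re-inserted at the position found by a hand-written binary search.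
import Mathlib
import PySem

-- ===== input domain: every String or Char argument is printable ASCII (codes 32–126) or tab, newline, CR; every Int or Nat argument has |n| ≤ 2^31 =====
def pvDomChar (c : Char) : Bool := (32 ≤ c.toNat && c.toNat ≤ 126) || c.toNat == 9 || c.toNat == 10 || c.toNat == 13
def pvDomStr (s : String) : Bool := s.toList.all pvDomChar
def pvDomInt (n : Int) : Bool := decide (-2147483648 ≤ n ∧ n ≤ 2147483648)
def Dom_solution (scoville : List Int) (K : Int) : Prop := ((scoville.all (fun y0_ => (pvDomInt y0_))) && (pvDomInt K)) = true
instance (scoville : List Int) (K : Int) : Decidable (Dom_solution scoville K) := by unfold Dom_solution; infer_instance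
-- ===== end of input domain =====

-- B replaces A's binary min-heap with a descending-sorted plain list: the two smallest are
-- popped from the end and the mixed value is re-inserted via a hand-written binary search.
-- A mutates no argument; the equivalence is about the return value.

-- ===== PORT A =====
-- heapq.heappush / heappop / heap[0] are modeled by their observable behavior on Int
-- (heap[0] is the minimum, heappop removes one minimum occurrence): the heap is kept as an
-- ascending sorted list, push = ordered insert, pop = head.  Exact for Int elements.
def hpush (heap : List Int) (s : Int) : List Int :=
  match heap with
  | [] => [s]
  | x :: xs => if s < x then s :: x :: xs else x :: hpush xs s

theorem hpush_length (heap : List Int) (s : Int) : (hpush heap s).length = heap.length + 1 := by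
  induction heap with
  | nil => rfl
  | cons x xs ih => simp only [hpush]; split <;> simp [ih]

def aloop (heap : List Int) (K : Int) (answer : Int) : Int :=
  match heap with
  | [] => 0  -- unreachable under Pre_: Python's heap[0] raises IndexError on the empty heap
  | h :: t =>
    if t.length = 0 ∧ h < K then -1
    else if K ≤ h then answer
    else
      match t with
      | [] => answer  -- unreachable: t = [] forces one of the two branches above
      | h2 :: rest => aloop (hpush rest (h + h2 * 2)) K (answer + 1)
termination_by heap.length
decreasing_by simp [hpush_length]

def solution (scoville : List Int) (K : Int) : Int :=
  aloop (scoville.foldl hpush []) K 0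

-- ===== PORT B =====
-- B's inner 'while lo < hi' binary search, step for step; lo, hi stay within [0, len(pot)]
-- so Python's nonnegative ints are carried as Nat and pot[mid] (always in range here,
-- exact: 0 ≤ lo ≤ mid < hi ≤ len(pot)) is pot.getD mid 0; (lo+hi)//2 on nonnegatives is Nat division.
def bins (pot : List Int) (v : Int) (lo hi : Nat) : Nat :=
  if lo < hi then
    if v < pot.getD ((lo + hi) / 2) 0 then bins pot v ((lo + hi) / 2 + 1) hi
    else bins pot v lo ((lo + hi) / 2)
  else lo
termination_by hi - lo
decreasing_by all_goals omega

def bloop (pot : List Int) (K : Int) (answer : Int) : Int :=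
  match PySem.List.pyGet? pot (-1) with
  | none => 0  -- unreachable under Pre_: Python's pot[-1] raises IndexError on the empty list
  | some last =>
    if K ≤ last then answer
    else if pot.length = 1 then -1
    else
      match hp : PySem.List.pop? pot (-1) with
      | none => 0  -- unreachable: pot ≠ []
      | some (a, pot1) =>
        match hp2 : PySem.List.pop? pot1 (-1) with
        | none => 0  -- unreachable: pot1 ≠ [] since pot.length ≥ 2
        | some (b, pot2) =>
          bloop (PySem.List.insert pot2 ((bins pot2 (a + 2 * b) 0 pot2.length : Nat) : Int) (a + 2 * b))
            K (answer + 1)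
termination_by pot.length
decreasing_by
  have h1 := PySem.List.length_of_pop?_eq_some pot hp
  have h2 := PySem.List.length_of_pop?_eq_some pot1 hp2
  simp only [PySem.List.length_insert] at *
  omega

def solution_alt (scoville : List Int) (K : Int) : Int :=
  bloop (PySem.List.sorted scoville (fun x => x) true) K 0

-- ===== PRECONDITION & SPEC =====
-- Pre_ excludes exactly the empty list, on which Python A raises IndexError (heap[0]).
def Pre_solution (scoville : List Int) (K : Int) : Prop := scoville ≠ []
instance (scoville : List Int) (K : Int) : Decidable (Pre_solution scoville K) := by
  unfold Pre_solution; infer_instance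

def pvWitness_solution : List Int × Int := ([1, 2, 3, 9, 10, 12], 7)

def Spec_solution (scoville : List Int) (K : Int) (out : Int) : Prop := out = solution_alt scoville K
instance (scoville : List Int) (K : Int) (out : Int) : Decidable (Spec_solution scoville K out) := by
  unfold Spec_solution; infer_instance

-- ===== CLAIM (what is proved, stated in full; the proofs are below) =====
def Claim_equal_solution : Prop := ∀ (scoville : List Int) (K : Int), Dom_solution scoville K → Pre_solution scoville K → Spec_solution scoville K (solution scoville K)

-- ===== LEMMAS AND PROOFS =====

theorem hpush_perm (heap : List Int) (s : Int) : (hpush heap s).Perm (s :: heap) := by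
  induction heap with
  | nil => rfl
  | cons x xs ih =>
    simp only [hpush]
    split
    · exact List.Perm.refl _
    · exact (ih.cons x).trans (List.Perm.swap s x xs)

theorem hpush_sorted (heap : List Int) (s : Int) (h : heap.Pairwise (· ≤ ·)) :
    (hpush heap s).Pairwise (· ≤ ·) := by
  induction heap with
  | nil => simp [hpush]
  | cons x xs ih =>
    rcases List.pairwise_cons.1 h with ⟨hx, hxs⟩
    simp only [hpush]
    split
    · rename_i hlt
      refine List.pairwise_cons.2 ⟨?_, h⟩
      intro y hy
      rcases List.mem_cons.1 hy with rfl | hy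
      · exact le_of_lt hlt
      · exact le_of_lt (lt_of_lt_of_le hlt (hx y hy))
    · rename_i hnlt
      refine List.pairwise_cons.2 ⟨?_, ih hxs⟩
      intro y hy
      rcases List.mem_cons.1 ((hpush_perm xs s).mem_iff.1 hy) with rfl | hy
      · exact le_of_not_gt hnlt
      · exact hx y hy

theorem foldl_hpush_perm (l acc : List Int) : (l.foldl hpush acc).Perm (acc ++ l) := by
  induction l generalizing acc with
  | nil => simp
  | cons x xs ih =>
    simp only [List.foldl_cons]
    refine (ih (hpush acc x)).trans ?_
    refine (List.Perm.append_right xs (hpush_perm acc x)).trans ?_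
    simpa using (List.perm_middle (a := x) (l₁ := acc) (l₂ := xs)).symm

theorem foldl_hpush_sorted (l acc : List Int) (h : acc.Pairwise (· ≤ ·)) :
    (l.foldl hpush acc).Pairwise (· ≤ ·) := by
  induction l generalizing acc with
  | nil => exact h
  | cons x xs ih => exact ih (hpush acc x) (hpush_sorted acc x h)

-- a descending-sorted list read through getD is antitone
theorem desc_getD_le (pot : List Int) (hs : pot.Pairwise (· ≥ ·)) (i j : Nat)
    (hij : i ≤ j) (hj : j < pot.length) : pot.getD j 0 ≤ pot.getD i 0 := by
  rw [List.getD_eq_getElem pot 0 hj, List.getD_eq_getElem pot 0 (lt_of_le_of_lt hij hj)]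
  rcases Nat.lt_or_ge i j with h | h
  · exact List.pairwise_iff_getElem.1 hs i j (by omega) hj h
  · have : i = j := by omega
    subst this
    exact le_rfl

theorem bins_spec (pot : List Int) (v : Int) (hs : pot.Pairwise (· ≥ ·)) :
    ∀ (n lo hi : Nat), hi - lo ≤ n → lo ≤ hi → hi ≤ pot.length →
    (∀ i, i < lo → v < pot.getD i 0) →
    (∀ i, hi ≤ i → i < pot.length → pot.getD i 0 ≤ v) →
    lo ≤ bins pot v lo hi ∧ bins pot v lo hi ≤ hi ∧
    (∀ i, i < bins pot v lo hi → v < pot.getD i 0) ∧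
    (∀ i, bins pot v lo hi ≤ i → i < pot.length → pot.getD i 0 ≤ v) := by
  intro n
  induction n with
  | zero =>
    intro lo hi hn hlh hhl h1 h2
    have heq : lo = hi := by omega
    subst heq
    rw [bins]
    simp only [lt_irrefl, if_false]
    exact ⟨le_rfl, le_rfl, h1, h2⟩
  | succ n ih =>
    intro lo hi hn hlh hhl h1 h2
    rw [bins]
    by_cases hlt : lo < hi
    · simp only [hlt, if_true]
      by_cases hv : v < pot.getD ((lo + hi) / 2) 0
      · simp only [hv, if_true]
        have := ih ((lo + hi) / 2 + 1) hi (by omega) (by omega) hhl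
          (fun i hi' => lt_of_lt_of_le hv (desc_getD_le pot hs i ((lo + hi) / 2) (by omega) (by omega)))
          h2
        exact ⟨by omega, this.2.1, this.2.2.1, this.2.2.2⟩
      · simp only [hv, if_false]
        have hle : pot.getD ((lo + hi) / 2) 0 ≤ v := le_of_not_gt hv
        have := ih lo ((lo + hi) / 2) (by omega) (by omega) (by omega) h1
          (fun i hi' hil => le_trans (desc_getD_le pot hs ((lo + hi) / 2) i hi' hil) hle)
        exact ⟨this.1, by omega, this.2.2.1, this.2.2.2⟩
    · simp only [hlt, if_false]
      have heq : lo = hi := by omega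
      subst heq
      exact ⟨le_rfl, le_rfl, h1, h2⟩

-- B's binary-search insertion into the descending list is A's ordered insert, reversed
theorem step_eq (rest : List Int) (v : Int) (hsort : rest.Pairwise (· ≤ ·)) :
    PySem.List.insert rest.reverse ((bins rest.reverse v 0 rest.reverse.length : Nat) : Int) v
      = (hpush rest v).reverse := by
  have hs : rest.reverse.Pairwise (· ≥ ·) := by
    rw [List.pairwise_reverse]; exact hsort
  obtain ⟨-, hle, hlow, hhigh⟩ := bins_spec rest.reverse v hs rest.reverse.length 0
    rest.reverse.length (by omega) (by omega) le_rfl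
    (fun i hi => absurd hi (Nat.not_lt_zero i)) (fun i hi hil => absurd hil (by omega))
  rw [PySem.List.insert_natCast rest.reverse _ v hle]
  apply PySem.List.eq_of_perm_of_pairwise_le_of_injective (fun x : Int => -x) neg_injective
  · refine (List.perm_middle.trans ?_).trans ((hpush_perm rest v).symm.trans (List.reverse_perm _).symm)
    rw [List.take_append_drop]
    exact (List.reverse_perm rest).cons v
  · refine List.Pairwise.imp (fun h => neg_le_neg h) ?_
    rw [List.pairwise_append]
    refine ⟨hs.sublist (List.take_sublist _ _), ?_, ?_⟩
    · refine List.pairwise_cons.2 ⟨?_, hs.sublist (List.drop_sublist _ _)⟩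
      intro y hy
      obtain ⟨j, hj, rfl⟩ := List.mem_iff_getElem.1 hy
      rw [List.getElem_drop]
      have hlen : bins rest.reverse v 0 rest.reverse.length + j < rest.reverse.length := by
        simp only [List.length_drop] at hj; omega
      rw [← List.getD_eq_getElem rest.reverse 0 hlen]
      exact hhigh _ (by omega) hlen
    · intro x hx y hy
      obtain ⟨i, hi, rfl⟩ := List.mem_iff_getElem.1 hx
      rw [List.getElem_take]
      have hir : i < bins rest.reverse v 0 rest.reverse.length := by
        simp only [List.length_take] at hi; omega
      have hilen : i < rest.reverse.length := lt_of_lt_of_le hir hle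
      rw [← List.getD_eq_getElem rest.reverse 0 hilen]
      have hxv : v < rest.reverse.getD i 0 := hlow i hir
      rcases List.mem_cons.1 hy with rfl | hy
      · exact le_of_lt hxv
      · obtain ⟨j, hj, rfl⟩ := List.mem_iff_getElem.1 hy
        rw [List.getElem_drop]
        have hlen : bins rest.reverse v 0 rest.reverse.length + j < rest.reverse.length := by
          simp only [List.length_drop] at hj; omega
        rw [← List.getD_eq_getElem rest.reverse 0 hlen]
        exact le_of_lt (lt_of_le_of_lt (hhigh _ (by omega) hlen) hxv)
  · rw [List.pairwise_reverse]
    exact (hpush_sorted rest v hsort).imp (fun h => neg_le_neg h)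

theorem aloop_nil (K answer : Int) : aloop [] K answer = 0 := by
  rw [aloop.eq_def]

theorem aloop_one (h K answer : Int) : aloop [h] K answer = if K ≤ h then answer else -1 := by
  rw [aloop.eq_def]
  simp only []
  by_cases hK : K ≤ h
  · have c1 : ¬ (([] : List Int).length = 0 ∧ h < K) := by
      rintro ⟨-, hlt⟩; omega
    simp [c1, hK]
  · simp [hK, lt_of_not_ge hK]

theorem aloop_two (h h2 : Int) (rest : List Int) (K answer : Int) :
    aloop (h :: h2 :: rest) K answer =
      if K ≤ h then answer else aloop (hpush rest (h + h2 * 2)) K (answer + 1) := by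
  rw [aloop.eq_def]
  simp only []
  have c1 : ¬ ((h2 :: rest).length = 0 ∧ h < K) := by simp
  rw [if_neg c1]

theorem bloop_nil (K answer : Int) : bloop [] K answer = 0 := by
  rw [bloop.eq_def]
  rfl

theorem bloop_one (h K answer : Int) : bloop [h] K answer = if K ≤ h then answer else -1 := by
  have hg := PySem.List.pyGet?_neg_one_append_singleton ([] : List Int) h
  simp only [List.nil_append] at hg
  rw [bloop.eq_def, hg]
  simp only []
  by_cases hK : K ≤ h
  · simp [hK]
  · simp [hK]

theorem bloop_two (pot : List Int) (h2 h K answer : Int) :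
    bloop ((pot ++ [h2]) ++ [h]) K answer =
      if K ≤ h then answer
      else bloop (PySem.List.insert pot ((bins pot (h + 2 * h2) 0 pot.length : Nat) : Int)
        (h + 2 * h2)) K (answer + 1) := by
  rw [bloop.eq_def, PySem.List.pyGet?_neg_one_append_singleton]
  simp only []
  by_cases hK : K ≤ h
  · rw [if_pos hK, if_pos hK]
  · rw [if_neg hK, if_neg hK, if_neg (by simp : ¬ ((pot ++ [h2]) ++ [h]).length = 1)]
    split
    · rename_i heq
      rw [PySem.List.pop?_last] at heq
      simp at heq
    · rename_i a pot1 heq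
      rw [PySem.List.pop?_last] at heq
      simp only [Option.some.injEq, Prod.mk.injEq] at heq
      obtain ⟨rfl, rfl⟩ := heq
      split
      · rename_i heq2
        rw [PySem.List.pop?_last] at heq2
        simp at heq2
      · rename_i b pot2 heq2
        rw [PySem.List.pop?_last] at heq2
        simp only [Option.some.injEq, Prod.mk.injEq] at heq2
        obtain ⟨rfl, rfl⟩ := heq2
        rfl

theorem loop_eq (n : Nat) : ∀ (heap : List Int) (K answer : Int),
    heap.length ≤ n → heap.Pairwise (· ≤ ·) →
    aloop heap K answer = bloop heap.reverse K answer := by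
  induction n with
  | zero =>
    intro heap K answer hlen _
    have : heap = [] := List.eq_nil_of_length_eq_zero (Nat.le_zero.1 hlen)
    subst this
    rw [aloop_nil, List.reverse_nil, bloop_nil]
  | succ n ih =>
    intro heap K answer hlen hsort
    rcases heap with _ | ⟨h, t⟩
    · rw [aloop_nil, List.reverse_nil, bloop_nil]
    rcases t with _ | ⟨h2, rest⟩
    · rw [aloop_one, show ([h] : List Int).reverse = [h] by simp, bloop_one]
    · rw [aloop_two, show (h :: h2 :: rest).reverse = (rest.reverse ++ [h2]) ++ [h] by simp,
        bloop_two]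
      by_cases hK : K ≤ h
      · rw [if_pos hK, if_pos hK]
      · rw [if_neg hK, if_neg hK]
        have hsrest : rest.Pairwise (· ≤ ·) :=
          (List.pairwise_cons.1 (List.pairwise_cons.1 hsort).2).2
        rw [show h + 2 * h2 = h + h2 * 2 by ring, step_eq rest (h + h2 * 2) hsrest]
        exact ih (hpush rest (h + h2 * 2)) K (answer + 1)
          (by have := hpush_length rest (h + h2 * 2)
              simp only [List.length_cons] at hlen; omega)
          (hpush_sorted rest _ hsrest)

-- ===== VERDICT (by name: the statement is the Claim_ definition above) =====
theorem solution_spec : Claim_equal_solution := by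
  intro scoville K _ _
  unfold Spec_solution solution solution_alt
  have hsorted_eq : PySem.List.sorted scoville (fun x => x) true
      = (scoville.foldl hpush []).reverse := by
    apply PySem.List.eq_of_perm_of_pairwise_le_of_injective (fun x : Int => -x) neg_injective
    · refine (PySem.List.sorted_perm scoville _ true).trans ?_
      refine ((foldl_hpush_perm scoville []).symm.trans ?_).trans (List.reverse_perm _).symm
      simp
    · exact (PySem.List.sorted_pairwise_rev scoville _).imp (fun h => neg_le_neg h)
    · rw [List.pairwise_reverse]
      exact (foldl_hpush_sorted scoville [] (by simp)).imp (fun h => neg_le_neg h)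
  rw [hsorted_eq]
  exact loop_eq (scoville.foldl hpush []).length (scoville.foldl hpush []) K 0 le_rfl
    (foldl_hpush_sorted scoville [] (by simp))
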